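-- pv_equiv track=rewrite | github.com/Tenormusica2024/x-bookmark-knowledge-pack | scripts/render_gallery.py | classify_media_type
-- ===== SOURCE A (Python) =====
-- def classify_media_type(tweet: dict) -> str:
--     media_items = tweet.get("media") or []
--     if not media_items:
--         return "text"
--     types = {m.get("type", "") for m in media_items}
--     if "video" in types:
--         return "video"
--     if "animated_gif" in types:
--         return "gif"
--     if "photo" in types:
--         return "photo"
--     return "text"
-- ===== SOURCE B (Python) =====
-- _PRIORITY = {"video": 3, "animated_gif": 2, "photo": 1}
-- _LABEL = {3: "video", 2: "gif", 1: "photo"}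
--
--
-- def classify_media_type(tweet: dict) -> str:
--     media_items = tweet.get("media") or []
--     best = 0
--     for m in media_items:
--         best = max(best, _PRIORITY.get(m.get("type", ""), 0))
--     return _LABEL.get(best, "text")
-- ===== Notes on version B (the rewrite author's own statement) =====
-- stated objective: idiomatic
-- what changed: Replaces the set-comprehension plus ordered membership chain by a single max-reduction over a priority map and one inverse-label lookup; the empty-media guard folds into the score 0.
import Mathlib
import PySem

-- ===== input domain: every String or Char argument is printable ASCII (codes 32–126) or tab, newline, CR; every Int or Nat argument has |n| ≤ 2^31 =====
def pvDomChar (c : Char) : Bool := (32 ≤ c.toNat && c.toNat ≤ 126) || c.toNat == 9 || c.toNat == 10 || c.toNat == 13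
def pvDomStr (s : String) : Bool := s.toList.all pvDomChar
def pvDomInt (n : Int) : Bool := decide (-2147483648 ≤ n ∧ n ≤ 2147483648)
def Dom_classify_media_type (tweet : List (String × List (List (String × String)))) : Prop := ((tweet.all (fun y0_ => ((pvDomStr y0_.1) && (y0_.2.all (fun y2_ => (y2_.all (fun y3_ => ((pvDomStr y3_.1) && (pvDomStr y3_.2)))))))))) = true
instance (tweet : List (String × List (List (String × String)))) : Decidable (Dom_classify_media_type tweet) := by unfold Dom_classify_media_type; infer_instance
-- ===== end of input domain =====

-- B replaces A's set comprehension + ordered membership chain by a one-pass max of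
-- a priority score plus an inverse label lookup (idiomatic decomposition).

-- ===== PORT A =====
def classify_media_type (tweet : List (String × List (List (String × String)))) : String :=
  let media_items := (PySem.Dict.get? (PySem.Dict.mk tweet) "media").getD []   -- tweet.get("media") or []
  if media_items = [] then "text"
  else
    let types : PySem.Set String :=
      PySem.Set.ofList (media_items.map (fun m => PySem.Dict.getD (PySem.Dict.mk m) "type" ""))
    if PySem.Set.contains types "video" then "video"
    else if PySem.Set.contains types "animated_gif" then "gif"
    else if PySem.Set.contains types "photo" then "photo"
    else "text"

-- ===== PORT B =====
-- _PRIORITY.get(t, 0)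
def pvPriority (t : String) : Nat :=
  if t = "video" then 3 else if t = "animated_gif" then 2 else if t = "photo" then 1 else 0

def classify_media_type_alt (tweet : List (String × List (List (String × String)))) : String :=
  let media_items := (PySem.Dict.get? (PySem.Dict.mk tweet) "media").getD []
  let best := media_items.foldl
    (fun a m => max a (pvPriority (PySem.Dict.getD (PySem.Dict.mk m) "type" ""))) 0
  -- _LABEL.get(best, "text")
  if best = 3 then "video" else if best = 2 then "gif" else if best = 1 then "photo" else "text"

-- ===== PRECONDITION & SPEC =====
def Spec_classify_media_type (tweet : List (String × List (List (String × String)))) (out : String) : Prop := out = classify_media_type_alt tweet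
instance (tweet : List (String × List (List (String × String)))) (out : String) : Decidable (Spec_classify_media_type tweet out) := by unfold Spec_classify_media_type; infer_instance

-- ===== CLAIM (what is proved, stated in full; the proofs are below) =====
def Claim_equal_classify_media_type : Prop := ∀ (tweet : List (String × List (List (String × String)))), Dom_classify_media_type tweet → Spec_classify_media_type tweet (classify_media_type tweet)

-- ===== LEMMAS AND PROOFS =====

def pvBest (ts : List String) : Nat := ts.foldl (fun a t => max a (pvPriority t)) 0

theorem pvFoldMax (ts : List String) (a : Nat) :
    ts.foldl (fun a t => max a (pvPriority t)) a = max a (pvBest ts) := by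
  induction ts generalizing a with
  | nil => simp only [List.foldl_nil, pvBest]; omega
  | cons t ts ih =>
    have h : pvBest (t :: ts) = max (max 0 (pvPriority t)) (pvBest ts) := by
      unfold pvBest; rw [List.foldl_cons, ih]; rfl
    rw [List.foldl_cons, ih, h]; omega

theorem pvBest_cons (t : String) (ts : List String) :
    pvBest (t :: ts) = max (pvPriority t) (pvBest ts) := by
  have h : pvBest (t :: ts) = max (max 0 (pvPriority t)) (pvBest ts) := by
    unfold pvBest; rw [List.foldl_cons, pvFoldMax]; rfl
  rw [h]; omega

theorem pvBest_le (ts : List String) : pvBest ts ≤ 3 := by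
  induction ts with
  | nil => simp [pvBest]
  | cons t ts ih =>
    rw [pvBest_cons]
    have : pvPriority t ≤ 3 := by unfold pvPriority; split_ifs <;> omega
    omega

theorem pvBest3 (ts : List String) : "video" ∈ ts ↔ 3 ≤ pvBest ts := by
  induction ts with
  | nil => simp [pvBest]
  | cons t ts ih =>
    have hp : 3 ≤ pvPriority t ↔ t = "video" := by
      unfold pvPriority; split_ifs with h1 h2 h3 <;> simp_all
    rw [pvBest_cons, List.mem_cons, le_max_iff, hp, ← ih, @eq_comm _ "video" t]

theorem pvBest2 (ts : List String) :
    "video" ∈ ts ∨ "animated_gif" ∈ ts ↔ 2 ≤ pvBest ts := by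
  induction ts with
  | nil => simp [pvBest]
  | cons t ts ih =>
    have hp : 2 ≤ pvPriority t ↔ t = "video" ∨ t = "animated_gif" := by
      unfold pvPriority; split_ifs with h1 h2 h3 <;> simp_all
    rw [pvBest_cons, List.mem_cons, List.mem_cons, le_max_iff, hp, ← ih, @eq_comm _ "video" t, @eq_comm _ "animated_gif" t]
    tauto

theorem pvBest1 (ts : List String) :
    "video" ∈ ts ∨ "animated_gif" ∈ ts ∨ "photo" ∈ ts ↔ 1 ≤ pvBest ts := by
  induction ts with
  | nil => simp [pvBest]
  | cons t ts ih =>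
    have hp : 1 ≤ pvPriority t ↔ t = "video" ∨ t = "animated_gif" ∨ t = "photo" := by
      unfold pvPriority; split_ifs with h1 h2 h3 <;> simp_all
    rw [pvBest_cons, List.mem_cons, List.mem_cons, List.mem_cons, le_max_iff, hp, ← ih, @eq_comm _ "video" t, @eq_comm _ "animated_gif" t, @eq_comm _ "photo" t]
    tauto

theorem pvKey (ts : List String) :
    (if "video" ∈ ts then "video"
     else if "animated_gif" ∈ ts then "gif"
     else if "photo" ∈ ts then "photo" else "text")
      = (if pvBest ts = 3 then "video" else if pvBest ts = 2 then "gif"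
         else if pvBest ts = 1 then "photo" else "text") := by
  have hle := pvBest_le ts
  have h3 := pvBest3 ts
  have h2 := pvBest2 ts
  have h1 := pvBest1 ts
  by_cases mv : "video" ∈ ts
  · have e : pvBest ts = 3 := by have := h3.mp mv; omega
    simp [mv, e]
  · have h3' : ¬ 3 ≤ pvBest ts := fun h => mv (h3.mpr h)
    by_cases mg : "animated_gif" ∈ ts
    · have e : pvBest ts = 2 := by have := h2.mp (Or.inr mg); omega
      simp [mv, mg, e]
    · have h2' : ¬ 2 ≤ pvBest ts := fun h => (by rcases h2.mpr h with h' | h' <;> tauto)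
      by_cases mp : "photo" ∈ ts
      · have e : pvBest ts = 1 := by have := h1.mp (Or.inr (Or.inr mp)); omega
        simp [mv, mg, mp, e]
      · have h1' : ¬ 1 ≤ pvBest ts := fun h =>
          (by rcases h1.mpr h with h' | h' | h' <;> tauto)
        have e : pvBest ts = 0 := by omega
        simp [mv, mg, mp, e]

-- ===== VERDICT (by name: the statement is the Claim_ definition above) =====
theorem classify_media_type_spec : Claim_equal_classify_media_type := by
  intro tweet _
  unfold Spec_classify_media_type classify_media_type classify_media_type_alt
  set items := (PySem.Dict.get? (PySem.Dict.mk tweet) "media").getD [] with hitems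
  simp only
  by_cases h : items = []
  · simp [h]
  · rw [if_neg h]
    set g := fun (m : List (String × String)) => PySem.Dict.getD (PySem.Dict.mk m) "type" "" with hg
    have hb : items.foldl (fun a m => max a (pvPriority (g m))) 0 = pvBest (items.map g) := by
      rw [pvBest, List.foldl_map]
    rw [hb]
    have hc : ∀ x : String,
        PySem.Set.contains (PySem.Set.ofList (items.map g)) x = decide (x ∈ items.map g) := by
      intro x
      by_cases hx : x ∈ items.map g
      · simp only [hx, decide_true]
        exact (PySem.Set.contains_iff _ _).mpr ((PySem.Set.mem_ofList _ _).mpr hx)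
      · simp only [hx, decide_false]
        rw [← Bool.not_eq_true]
        intro hcc
        exact hx ((PySem.Set.mem_ofList _ _).mp ((PySem.Set.contains_iff _ _).mp hcc))
    rw [hc, hc, hc]
    have := pvKey (items.map g)
    simpa using this
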